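-- pv_equiv track=rewrite | github.com/kgaleziowski/python-database-normalization | norm.py | generate_closure_string
-- ===== SOURCE A (Python) =====
-- from itertools import combinations
--
-- def combo(attributes):
--     length = len(attributes)
--     temp = []
--     for i in range(length):
--         if i == 0:
--             for j in attributes:
--                 temp.append(j)
--         else:
--             combs = combinations(attributes, i+1)
--             for combo in combs:
--                 combo = sorted(combo)
--                 temp.append(','.join(combo))
--     sorted_alphabetically = sorted(temp)
--     sorted_len_alpha = sorted(sorted_alphabetically,key=len)
--     return sorted_len_alpha
--
-- def closer(combination, relations):
--     closing_set = set(combination)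
--     basic_length = len(closing_set)
--     for relation in relations:
--         set_attr = set(relation[0].split(","))
--         if set_attr.issubset(closing_set):
--             add = relation[1]
--             closing_set.add(add)
--             if len(closing_set) != basic_length:
--                 return closer(closing_set, relations)
--     return_set = sorted(closing_set)
--     return return_set
--
-- def generate_closure_string(attributes, relations):
--     closure_str = ""
--     all_combinations = combo(attributes)
--     for combination in all_combinations:
--         temp_attr = combination.split(',')
--         closure = closer(temp_attr, relations)
--         closure_str= closure_str + "".join(closure)
--     return closure_str
-- ===== SOURCE B (Python) =====
-- def _closure(tokens, relations):
--     closed = set(tokens)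
--     for _ in range(len(relations)):
--         new = {r for l, r in relations if set(l.split(',')) <= closed}
--         if new <= closed:
--             break
--         closed |= new
--     return closed
--
-- def generate_closure_string(attributes, relations):
--     subsets = [[]]
--     for a in attributes:
--         subsets = subsets + [s + [a] for s in subsets]
--     labels = sorted((','.join(sorted(s)) for s in subsets if s),
--                     key=lambda c: (len(c), c))
--     return ''.join(''.join(sorted(_closure(lab.split(','), relations)))
--                    for lab in labels)
-- ===== Notes on version B (the rewrite author's own statement) =====
-- stated objective: alternative
-- what changed: B enumerates the nonempty subsets by iterative powerset doubling and sorts them once with a (length, value) tuple key instead of per-size itertools.combinations followed by a stable double sort, and it computes each attribute closure by round-based bulk saturation (add all currently derivable right-hand sides per round) instead of A's recursive restart-and-rescan after every single addition.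
import Mathlib
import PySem

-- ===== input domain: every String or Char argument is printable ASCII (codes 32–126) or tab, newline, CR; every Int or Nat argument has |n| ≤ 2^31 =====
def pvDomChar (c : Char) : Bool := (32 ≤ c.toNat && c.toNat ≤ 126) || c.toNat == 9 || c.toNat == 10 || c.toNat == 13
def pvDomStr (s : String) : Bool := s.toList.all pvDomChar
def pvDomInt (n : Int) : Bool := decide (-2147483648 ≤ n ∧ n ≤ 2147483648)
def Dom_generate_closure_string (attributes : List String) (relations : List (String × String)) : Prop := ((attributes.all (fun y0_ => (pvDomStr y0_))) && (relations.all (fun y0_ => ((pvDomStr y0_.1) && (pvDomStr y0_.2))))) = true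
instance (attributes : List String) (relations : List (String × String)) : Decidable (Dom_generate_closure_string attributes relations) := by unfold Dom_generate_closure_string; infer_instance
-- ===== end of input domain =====

-- B replaces A's per-size combinations + stable double sort by a powerset-doubling pass with one
-- (length, value)-keyed sort, and A's restart-rescan closure recursion by round-based bulk saturation
-- (objective: alternative algorithm, similar cost).

-- ===== PORT A =====

-- helper for A's 'closer': one pass of 'for relation in relations' — Sum.inr S' transliterates
-- 'return closer(closing_set, relations)' (the restart), Sum.inl the normal loop exit.
def closerScanA (S : PySem.Set String) (basic : Int) :
    List (String × String) → (PySem.Set String) ⊕ (PySem.Set String)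
  | [] => Sum.inl S
  | rel :: rest =>
    -- set_attr = set(relation[0].split(",")) ; sep is the literal "," ≠ "", so split? is some
    let set_attr := PySem.Set.ofList ((PySem.Str.split? rel.1 ",").getD [])
    if PySem.Set.issubset set_attr S then
      let S' := PySem.Set.add S rel.2
      if PySem.Set.len S' ≠ basic then Sum.inr S'
      else closerScanA S' basic rest
    else closerScanA S basic rest

-- A's 'closer'; fuel only makes the Python restart recursion structural (each restart adds one new
-- right-hand side, so relations.length + 1 at the call site is proved sufficient below).
def closerA (fuel : Nat) (combination : List String) (relations : List (String × String)) : List String :=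
  match fuel with
  | 0 => []
  | f + 1 =>
    let closing_set := PySem.Set.ofList combination
    match closerScanA closing_set (PySem.Set.len closing_set) relations with
    | Sum.inr S' => closerA f S' relations
    | Sum.inl Sf => PySem.List.sorted Sf (fun x => x)

def generate_closure_string (attributes : List String) (relations : List (String × String)) : String :=
  -- combo(attributes)
  let temp := (PySem.List.pyRange 0 (PySem.List.len attributes) 1).foldl
    (fun temp i =>
      if i = 0 then temp ++ attributes
      else temp ++ (PySem.List.combinations attributes (i + 1).toNat).map
        (fun c => PySem.Str.join "," (PySem.List.sorted c (fun x => x)))) []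
  let sorted_alphabetically := PySem.List.sorted temp (fun x => x)
  let all_combinations := PySem.List.sorted sorted_alphabetically PySem.Str.len
  -- main loop of generate_closure_string
  all_combinations.foldl
    (fun closure_str combination =>
      closure_str ++ PySem.Str.join ""
        (closerA (relations.length + 1) ((PySem.Str.split? combination ",").getD []) relations))
    ""

-- ===== PORT B =====

-- new = {r for l, r in relations if set(l.split(',')) <= closed}
def bNew (relations : List (String × String)) (closed : PySem.Set String) : PySem.Set String :=
  relations.foldl
    (fun n rel =>
      if PySem.Set.issubset (PySem.Set.ofList ((PySem.Str.split? rel.1 ",").getD [])) closed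
      then PySem.Set.add n rel.2 else n)
    PySem.Set.empty

-- the 'for _ in range(len(relations)) … break' saturation loop of _closure
def bLoop (relations : List (String × String)) : Nat → PySem.Set String → PySem.Set String
  | 0, closed => closed
  | k + 1, closed =>
    let nw := bNew relations closed
    if PySem.Set.issubset nw closed then closed
    else bLoop relations k (PySem.Set.union closed nw)

def generate_closure_string_alt (attributes : List String) (relations : List (String × String)) : String :=
  let subsets := attributes.foldl (fun acc a => acc ++ acc.map (fun s => s ++ [a])) [[]]
  let labels := PySem.List.sorted2
    ((subsets.filter (fun s => s ≠ [])).map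
      (fun s => PySem.Str.join "," (PySem.List.sorted s (fun x => x))))
    PySem.Str.len (fun x => x)
  PySem.Str.join ""
    (labels.map (fun lab => PySem.Str.join ""
      (PySem.List.sorted
        (bLoop relations relations.length
          (PySem.Set.ofList ((PySem.Str.split? lab ",").getD [])))
        (fun x => x))))

-- ===== PRECONDITION & SPEC =====
def Spec_generate_closure_string (attributes : List String) (relations : List (String × String)) (out : String) : Prop := out = generate_closure_string_alt attributes relations
instance (attributes : List String) (relations : List (String × String)) (out : String) : Decidable (Spec_generate_closure_string attributes relations out) := by unfold Spec_generate_closure_string; infer_instance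

-- ===== CLAIM (what is proved, stated in full; the proofs are below) =====
def Claim_equal_generate_closure_string : Prop := ∀ (attributes : List String) (relations : List (String × String)), Dom_generate_closure_string attributes relations → Spec_generate_closure_string attributes relations (generate_closure_string attributes relations)

-- ===== LEMMAS AND PROOFS =====

-- ---- generic counting lemma for the termination measure ----
theorem pv_countP_strict {α : Type} {l : List α} {p q : α → Bool}
    (hpq : ∀ x ∈ l, q x = true → p x = true) {a : α}
    (ha : a ∈ l) (hpa : p a = true) (hqa : ¬ q a = true) :
    l.countP q < l.countP p := by
  induction l with
  | nil => cases ha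
  | cons b t ih =>
    rw [List.countP_cons, List.countP_cons]
    rcases List.mem_cons.mp ha with rfl | hat
    · have hle : t.countP q ≤ t.countP p :=
        List.countP_mono_left (fun x hx => hpq x (List.mem_cons_of_mem _ hx))
      simp [hpa, hqa]; omega
    · have h1 := ih (fun x hx h => hpq x (List.mem_cons_of_mem _ hx) h) hat
      have h2 : (if q b then 1 else 0) ≤ (if p b then 1 else 0) := by
        by_cases hq : q b = true
        · simp [hq, hpq b (List.mem_cons_self) hq]
        · simp [hq]
      omega

-- ---- the closure predicate both algorithms compute ----
inductive Deriv (rels : List (String × String)) (C : List String) : String → Prop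
  | base {x : String} : x ∈ C → Deriv rels C x
  | step {rel : String × String} : rel ∈ rels →
      (∀ a ∈ (PySem.Str.split? rel.1 ",").getD [], Deriv rels C a) → Deriv rels C rel.2

theorem deriv_mem {rels : List (String × String)} {C S : List String} {x : String}
    (hbase : ∀ a ∈ C, a ∈ S)
    (hcl : ∀ rel ∈ rels, (∀ a ∈ (PySem.Str.split? rel.1 ",").getD [], a ∈ S) → rel.2 ∈ S)
    (h : Deriv rels C x) : x ∈ S := by
  induction h with
  | base h => exact hbase _ h
  | step hrel _ ih => exact hcl _ hrel ih

theorem deriv_cut {rels : List (String × String)} {C C' : List String} {x : String}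
    (hC' : ∀ a ∈ C', Deriv rels C a) (h : Deriv rels C' x) : Deriv rels C x := by
  induction h with
  | base h => exact hC' _ h
  | step hrel _ ih => exact Deriv.step hrel ih

-- ---- the termination measure: distinct right-hand sides not yet in S ----
def muA (rels : List (String × String)) (S : List String) : Nat :=
  (PySem.List.dedup (rels.map Prod.snd)).countP (fun r => decide (r ∉ S))

theorem muA_le (rels : List (String × String)) (S : List String) :
    muA rels S ≤ rels.length := by
  calc (PySem.List.dedup (rels.map Prod.snd)).countP (fun r => decide (r ∉ S))
      ≤ (PySem.List.dedup (rels.map Prod.snd)).length := List.countP_le_length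
    _ ≤ (rels.map Prod.snd).length := by
        simp only [PySem.List.dedup_eq_ofList]; exact PySem.Set.length_ofList_le _
    _ = rels.length := List.length_map ..

theorem muA_lt {rels : List (String × String)} {S S' : List String} {r : String}
    (hr : r ∈ rels.map Prod.snd) (hrS : r ∉ S)
    (hsub : ∀ x ∈ S, x ∈ S') (hrS' : r ∈ S') :
    muA rels S' < muA rels S := by
  refine pv_countP_strict (p := fun x => decide (x ∉ S)) (q := fun x => decide (x ∉ S'))
    (fun x _ hx => ?_) ((PySem.List.mem_dedup _ _).mpr hr) (by simpa using hrS) (by simpa using hrS')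
  simp only [decide_eq_true_eq] at hx ⊢
  exact fun hxS => hx (hsub x hxS)

-- ---- A's scan: characterising the two exits of one pass over relations ----
theorem scanA_inl {S : PySem.Set String} :
    ∀ (rels' : List (String × String)) {T : PySem.Set String},
      closerScanA S (PySem.Set.len S) rels' = Sum.inl T →
      T = S ∧ ∀ rel ∈ rels', (∀ a ∈ (PySem.Str.split? rel.1 ",").getD [], a ∈ S) → rel.2 ∈ S := by
  intro rels'; induction rels' with
  | nil => intro T h; simp only [closerScanA, Sum.inl.injEq] at h; exact ⟨h.symm, by simp⟩
  | cons rel rest ih =>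
    intro T h
    simp only [closerScanA] at h
    by_cases hsub : PySem.Set.issubset (PySem.Set.ofList ((PySem.Str.split? rel.1 ",").getD [])) S = true
    · rw [if_pos hsub] at h
      by_cases hmem : rel.2 ∈ S
      · rw [PySem.Set.add_of_mem hmem] at h
        rw [if_neg (by simp)] at h
        obtain ⟨hT, hrest⟩ := ih h
        refine ⟨hT, fun r hr hpre => ?_⟩
        rcases List.mem_cons.mp hr with rfl | h'
        · exact hmem
        · exact hrest r h' hpre
      · rw [PySem.Set.add_of_not_mem hmem] at h
        rw [if_pos (by simp [PySem.Set.len])] at h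
        cases h
    · rw [if_neg hsub] at h
      obtain ⟨hT, hrest⟩ := ih h
      refine ⟨hT, fun r hr hpre => ?_⟩
      rcases List.mem_cons.mp hr with rfl | h'
      · exact absurd ((PySem.Set.issubset_iff _ _).mpr
          (fun x hx => hpre x ((PySem.Set.mem_ofList _ x).mp hx))) hsub
      · exact hrest r h' hpre

theorem scanA_inr {S : PySem.Set String} :
    ∀ (rels' : List (String × String)) {T : PySem.Set String},
      closerScanA S (PySem.Set.len S) rels' = Sum.inr T →
      ∃ rel ∈ rels', (∀ a ∈ (PySem.Str.split? rel.1 ",").getD [], a ∈ S) ∧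
        rel.2 ∉ S ∧ T = S ++ [rel.2] := by
  intro rels'; induction rels' with
  | nil => intro T h; simp [closerScanA] at h
  | cons rel rest ih =>
    intro T h
    simp only [closerScanA] at h
    by_cases hsub : PySem.Set.issubset (PySem.Set.ofList ((PySem.Str.split? rel.1 ",").getD [])) S = true
    · rw [if_pos hsub] at h
      by_cases hmem : rel.2 ∈ S
      · rw [PySem.Set.add_of_mem hmem] at h
        rw [if_neg (by simp)] at h
        obtain ⟨r, hr, hpre, hnot, hT⟩ := ih h
        exact ⟨r, List.mem_cons_of_mem _ hr, hpre, hnot, hT⟩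
      · rw [PySem.Set.add_of_not_mem hmem] at h
        rw [if_pos (by simp [PySem.Set.len])] at h
        refine ⟨rel, List.mem_cons_self, fun a ha => ?_, hmem, (Sum.inr.injEq _ _ ▸ h).symm⟩
        exact (PySem.Set.issubset_iff _ _).mp hsub a ((PySem.Set.mem_ofList _ a).mpr ha)
    · rw [if_neg hsub] at h
      obtain ⟨r, hr, hpre, hnot, hT⟩ := ih h
      exact ⟨r, List.mem_cons_of_mem _ hr, hpre, hnot, hT⟩

-- ---- A's closer computes the closure ----
theorem closerA_spec (rels : List (String × String)) :
    ∀ (fuel : Nat) (C : List String), muA rels (PySem.Set.ofList C) < fuel →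
      ∃ L : List String, closerA fuel C rels = PySem.List.sorted L (fun x => x) ∧
        L.Nodup ∧ ∀ x, x ∈ L ↔ Deriv rels C x := by
  intro fuel
  induction fuel with
  | zero => intro C h; omega
  | succ f ih =>
    intro C hmu
    have hnodS : (PySem.Set.ofList C).Nodup := PySem.Set.nodup_ofList C
    cases hscan : closerScanA (PySem.Set.ofList C) (PySem.Set.len (PySem.Set.ofList C)) rels with
    | inl T =>
      obtain ⟨rfl, hcl⟩ := scanA_inl rels hscan
      refine ⟨PySem.Set.ofList C, ?_, hnodS, fun x => ?_⟩
      · simp only [closerA]; rw [hscan]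
      · constructor
        · intro hx; exact Deriv.base ((PySem.Set.mem_ofList _ _).mp hx)
        · exact deriv_mem (fun a ha => (PySem.Set.mem_ofList _ _).mpr ha) hcl
    | inr T =>
      obtain ⟨rel, hrel, hpre, hnot, rfl⟩ := scanA_inr rels hscan
      have hnodT : (PySem.Set.ofList C ++ [rel.2]).Nodup := by
        rw [List.nodup_append]
        exact ⟨hnodS, List.nodup_singleton _, by intro a ha b hb heq; exact hnot (((List.mem_singleton.mp hb) ▸ heq) ▸ ha)⟩
      have hofT : PySem.Set.ofList (PySem.Set.ofList C ++ [rel.2]) = PySem.Set.ofList C ++ [rel.2] :=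
        PySem.Set.ofList_eq_self_of_nodup _ hnodT
      have hmu' : muA rels (PySem.Set.ofList (PySem.Set.ofList C ++ [rel.2])) < f := by
        rw [hofT]
        have h1 : muA rels (PySem.Set.ofList C ++ [rel.2]) < muA rels (PySem.Set.ofList C) :=
          muA_lt (List.mem_map.mpr ⟨rel, hrel, rfl⟩) hnot
            (fun x hx => List.mem_append_left _ hx) (List.mem_append_right _ (List.mem_singleton.mpr rfl))
        omega
      obtain ⟨L, heq, hnod, hmem⟩ := ih (PySem.Set.ofList C ++ [rel.2]) hmu'
      refine ⟨L, ?_, hnod, fun x => ?_⟩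
      · simp only [closerA]; rw [hscan]; exact heq
      · rw [hmem x]
        constructor
        · intro h
          refine deriv_cut (fun a ha => ?_) h
          rcases List.mem_append.mp ha with haS | ha2
          · exact Deriv.base ((PySem.Set.mem_ofList _ _).mp haS)
          · rw [List.mem_singleton.mp ha2]
            exact Deriv.step hrel
              (fun a' ha' => Deriv.base ((PySem.Set.mem_ofList _ _).mp (hpre a' ha')))
        · intro h
          refine deriv_cut (fun a ha => Deriv.base ?_) h
          exact List.mem_append_left _ ((PySem.Set.mem_ofList _ _).mpr ha)

-- ---- B's new-facts set ----
theorem bNew_mem (rels : List (String × String)) (closed : PySem.Set String) (x : String) :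
    x ∈ bNew rels closed ↔
      ∃ rel ∈ rels, (∀ a ∈ (PySem.Str.split? rel.1 ",").getD [], a ∈ closed) ∧ x = rel.2 := by
  have aux : ∀ (rels' : List (String × String)) (acc : PySem.Set String),
      x ∈ rels'.foldl
        (fun n rel =>
          if PySem.Set.issubset (PySem.Set.ofList ((PySem.Str.split? rel.1 ",").getD [])) closed
          then PySem.Set.add n rel.2 else n) acc ↔
      x ∈ acc ∨ ∃ rel ∈ rels', (∀ a ∈ (PySem.Str.split? rel.1 ",").getD [], a ∈ closed) ∧ x = rel.2 := by
    intro rels'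
    induction rels' with
    | nil => intro acc; simp
    | cons rel rest ih =>
      intro acc
      simp only [List.foldl_cons]
      by_cases hsub : PySem.Set.issubset (PySem.Set.ofList ((PySem.Str.split? rel.1 ",").getD [])) closed = true
      · rw [if_pos hsub, ih]
        rw [PySem.Set.mem_add]
        constructor
        · rintro ((hx | rfl) | ⟨r, hr, hp, rfl⟩)
          · exact Or.inl hx
          · exact Or.inr ⟨rel, List.mem_cons_self, fun a ha => (PySem.Set.issubset_iff _ _).mp hsub a ((PySem.Set.mem_ofList _ a).mpr ha), rfl⟩
          · exact Or.inr ⟨r, List.mem_cons_of_mem _ hr, hp, rfl⟩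
        · rintro (hx | ⟨r, hr, hp, rfl⟩)
          · exact Or.inl (Or.inl hx)
          · rcases List.mem_cons.mp hr with rfl | hr'
            · exact Or.inl (Or.inr rfl)
            · exact Or.inr ⟨r, hr', hp, rfl⟩
      · rw [if_neg hsub, ih]
        constructor
        · rintro (hx | ⟨r, hr, hp, rfl⟩)
          · exact Or.inl hx
          · exact Or.inr ⟨r, List.mem_cons_of_mem _ hr, hp, rfl⟩
        · rintro (hx | ⟨r, hr, hp, rfl⟩)
          · exact Or.inl hx
          · rcases List.mem_cons.mp hr with rfl | hr'
            · exact absurd ((PySem.Set.issubset_iff _ _).mpr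
                (fun a ha => hp a ((PySem.Set.mem_ofList _ a).mp ha))) hsub
            · exact Or.inr ⟨r, hr', hp, rfl⟩
  unfold bNew
  have h := aux rels PySem.Set.empty
  simp only [show (PySem.Set.empty : PySem.Set String) = [] from rfl, List.not_mem_nil, false_or] at h
  exact h

-- ---- B's saturation loop computes the closure ----
theorem bLoop_spec (rels : List (String × String)) (tokens : List String) :
    ∀ (k : Nat) (S : PySem.Set String), S.Nodup → (∀ a ∈ tokens, a ∈ S) →
      (∀ x ∈ S, Deriv rels tokens x) → muA rels S ≤ k →
      (bLoop rels k S).Nodup ∧ ∀ x, x ∈ bLoop rels k S ↔ Deriv rels tokens x := by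
  intro k
  induction k with
  | zero =>
    intro S hnod htok hder hmu
    simp only [bLoop]
    have hcl : ∀ rel ∈ rels, (∀ a ∈ (PySem.Str.split? rel.1 ",").getD [], a ∈ S) → rel.2 ∈ S := by
      intro rel hrel _
      have h0 : muA rels S = 0 := Nat.le_zero.mp hmu
      have := List.countP_eq_zero.mp h0 rel.2
        ((PySem.List.mem_dedup _ _).mpr (List.mem_map.mpr ⟨rel, hrel, rfl⟩))
      simpa using this
    exact ⟨hnod, fun x => ⟨hder x, fun h => deriv_mem htok hcl h⟩⟩
  | succ k ih =>
    intro S hnod htok hder hmu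
    simp only [bLoop]
    by_cases hsub : PySem.Set.issubset (bNew rels S) S = true
    · rw [if_pos hsub]
      refine ⟨hnod, fun x => ⟨hder x, fun h => deriv_mem htok ?_ h⟩⟩
      intro rel hrel hpre
      exact (PySem.Set.issubset_iff _ _).mp hsub rel.2 ((bNew_mem rels S rel.2).mpr ⟨rel, hrel, hpre, rfl⟩)
    · rw [if_neg hsub]
      have hderU : ∀ x ∈ PySem.Set.union S (bNew rels S), Deriv rels tokens x := by
        intro x hx
        rcases (PySem.Set.mem_union _ _ _).mp hx with h | h
        · exact hder x h
        · obtain ⟨rel, hrel, hpre, rfl⟩ := (bNew_mem rels S x).mp h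
          exact Deriv.step hrel (fun a ha => hder a (hpre a ha))
      have hx0 : ∃ r, r ∈ bNew rels S ∧ r ∉ S := by
        by_contra hall
        refine hsub ((PySem.Set.issubset_iff _ _).mpr (fun x hx => ?_))
        by_contra hxS
        exact hall ⟨x, hx, hxS⟩
      obtain ⟨r, hrnew, hrS⟩ := hx0
      have hrsnd : r ∈ rels.map Prod.snd := by
        obtain ⟨rel, hrel, _, rfl⟩ := (bNew_mem rels S r).mp hrnew
        exact List.mem_map.mpr ⟨rel, hrel, rfl⟩
      have hmuU : muA rels (PySem.Set.union S (bNew rels S)) < muA rels S :=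
        muA_lt hrsnd hrS (fun x hx => (PySem.Set.mem_union _ _ _).mpr (Or.inl hx))
          ((PySem.Set.mem_union _ _ _).mpr (Or.inr hrnew))
      exact ih (PySem.Set.union S (bNew rels S)) (PySem.Set.nodup_union _ _ hnod)
        (fun a ha => (PySem.Set.mem_union _ _ _).mpr (Or.inl (htok a ha))) hderU (by omega)

-- ---- per-label: A's closer equals the sorted saturation result ----
theorem perLabel (rels : List (String × String)) (lab : String) :
    closerA (rels.length + 1) ((PySem.Str.split? lab ",").getD []) rels
    = PySem.List.sorted (bLoop rels rels.length (PySem.Set.ofList ((PySem.Str.split? lab ",").getD []))) (fun x => x) := by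
  set tokens := (PySem.Str.split? lab ",").getD [] with htokens
  obtain ⟨L, heq, hnodL, hmemL⟩ := closerA_spec rels (rels.length + 1) tokens
    (lt_of_le_of_lt (muA_le rels _) (by omega))
  obtain ⟨hnodB, hmemB⟩ := bLoop_spec rels tokens rels.length (PySem.Set.ofList tokens)
    (PySem.Set.nodup_ofList tokens) (fun a ha => (PySem.Set.mem_ofList _ _).mpr ha)
    (fun x hx => Deriv.base ((PySem.Set.mem_ofList _ _).mp hx)) (muA_le rels _)
  rw [heq]
  exact PySem.List.sorted_eq_sorted_of_perm _ _ _ (fun a b h => h)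
    ((List.perm_ext_iff_of_nodup hnodL hnodB).mpr (fun a => (hmemL a).trans (hmemB a).symm))

-- ---- the subset-label list: A's per-size combinations vs B's powerset doubling ----
def fjoin (c : List String) : String := PySem.Str.join "," (PySem.List.sorted c (fun x => x))

theorem fjoin_singleton (x : String) : fjoin [x] = x := by
  unfold fjoin
  rw [show PySem.List.sorted [x] (fun y : String => y) = [x] from rfl, ← String.toList_inj]
  simp [PySem.Str.toList_join, PySem.Chars.join_singleton]

theorem tempA_eq (attrs : List String) :
    (PySem.List.pyRange 0 (PySem.List.len attrs) 1).foldl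
      (fun temp i => if i = 0 then temp ++ attrs
        else temp ++ (PySem.List.combinations attrs (i + 1).toNat).map fjoin) []
    = (List.range attrs.length).flatMap (fun k => (PySem.List.combinations attrs (k + 1)).map fjoin) := by
  rw [PySem.List.len_eq, PySem.List.pyRange_zero_natCast, List.foldl_map]
  rw [PySem.List.foldl_congr_mem (List.range attrs.length) _
    (fun temp k => temp ++ (PySem.List.combinations attrs (k + 1)).map fjoin) [] ?_]
  · rw [PySem.List.foldl_append_eq_flatMap]; simp
  · intro acc k _
    by_cases hk0 : k = 0
    · subst hk0
      rw [if_pos (by simp)]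
      show acc ++ attrs = acc ++ List.map fjoin (PySem.List.combinations attrs 1)
      rw [PySem.List.combinations_one, List.map_map]
      have hcomp : (fjoin ∘ fun x : String => [x]) = fun x : String => x :=
        funext fun a => fjoin_singleton a
      rw [hcomp]
      simp
    · rw [if_neg (by exact_mod_cast hk0)]
      have : ((k : Int) + 1).toNat = k + 1 := by omega
      rw [this]

theorem subsetsB_eq (attrs : List String) :
    attrs.foldl (fun acc a => acc ++ acc.map (fun s => s ++ [a])) [[]] = attrs.sublists := by
  induction attrs using List.reverseRecOn with
  | nil => simp
  | append_singleton l a ih =>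
    rw [List.foldl_append]
    simp only [List.foldl_cons, List.foldl_nil]
    rw [ih, List.sublists_concat]

theorem comb_perm {α : Type} : ∀ (xs : List α) (r : Nat),
    (PySem.List.combinations xs r).Perm (List.sublistsLen r xs) := by
  intro xs
  induction xs with
  | nil =>
    intro r
    cases r with
    | zero => simp [PySem.List.combinations_zero, List.sublistsLen_zero]
    | succ r => simp [PySem.List.combinations_nil_succ, List.sublistsLen_succ_nil]
  | cons x t ih =>
    intro r
    cases r with
    | zero => simp [PySem.List.combinations_zero, List.sublistsLen_zero]
    | succ r =>
      rw [PySem.List.combinations_cons_succ, List.sublistsLen_succ_cons]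
      exact List.perm_append_comm.trans (List.Perm.append (ih (r + 1)) ((ih r).map _))

theorem temp_perm (attrs : List String) :
    ((PySem.List.pyRange 0 (PySem.List.len attrs) 1).foldl
      (fun temp i => if i = 0 then temp ++ attrs
        else temp ++ (PySem.List.combinations attrs (i + 1).toNat).map fjoin) []).Perm
    (((attrs.foldl (fun acc a => acc ++ acc.map (fun s => s ++ [a])) [[]]).filter
        (fun s => s ≠ [])).map fjoin) := by
  rw [tempA_eq, subsetsB_eq]
  have h2 : (((List.range (attrs.length + 1)).flatMap (fun k => List.sublistsLen k attrs)).filter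
      (fun s => s ≠ []))
      = (List.range attrs.length).flatMap (fun k => List.sublistsLen (k + 1) attrs) := by
    rw [List.filter_flatMap, List.range_succ_eq_map]
    simp only [List.flatMap_cons, List.sublistsLen_zero]
    rw [List.flatMap_map]
    have h0 : List.filter (fun s => s ≠ []) [([] : List String)] = [] := by simp
    rw [h0, List.nil_append]
    have hfun : (fun k => List.filter (fun s => s ≠ []) (List.sublistsLen (Nat.succ k) attrs))
        = fun k => List.sublistsLen (k + 1) attrs := by
      funext k
      refine List.filter_eq_self.mpr (fun c hc => ?_)
      have hl := List.length_of_sublistsLen hc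
      simp only [ne_eq, decide_eq_true_eq]
      intro hnil
      rw [hnil] at hl
      simp at hl
    rw [hfun]
  have h1 : ((attrs.sublists.filter (fun s => s ≠ [])).Perm
      ((List.range attrs.length).flatMap (fun k => List.sublistsLen (k + 1) attrs))) := by
    rw [← h2]
    exact List.Perm.filter _
      ((List.sublists_perm_sublists' attrs).trans (List.range_bind_sublistsLen_perm attrs).symm)
  have h3 : ((List.range attrs.length).flatMap
        (fun k => (PySem.List.combinations attrs (k + 1)).map fjoin)).Perm
      ((List.range attrs.length).flatMap (fun k => (List.sublistsLen (k + 1) attrs).map fjoin)) :=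
    List.Perm.flatMap_left _ (fun k _ => (comb_perm attrs (k + 1)).map _)
  have h4 : (List.range attrs.length).flatMap (fun k => (List.sublistsLen (k + 1) attrs).map fjoin)
      = ((List.range attrs.length).flatMap (fun k => List.sublistsLen (k + 1) attrs)).map fjoin := by
    rw [List.map_flatMap]
  exact h3.trans (h4 ▸ ((h1.map fjoin).symm))

-- ---- the sort orders: stable double sort vs one lexicographic sort ----
def Rle (a b : String) : Prop :=
  PySem.Str.len a < PySem.Str.len b ∨ (PySem.Str.len a = PySem.Str.len b ∧ a ≤ b)

theorem Rle_trans {a b c : String} (h1 : Rle a b) (h2 : Rle b c) : Rle a c := by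
  rcases h1 with h1 | ⟨h1, h1'⟩ <;> rcases h2 with h2 | ⟨h2, h2'⟩
  · exact Or.inl (h1.trans h2)
  · exact Or.inl (h2 ▸ h1)
  · exact Or.inl (h1 ▸ h2)
  · exact Or.inr ⟨h1.trans h2, h1'.trans h2'⟩

theorem Rle_antisymm (a b : String) (h1 : Rle a b) (h2 : Rle b a) : a = b := by
  rcases h1 with h1 | ⟨h1, h1'⟩ <;> rcases h2 with h2 | ⟨h2, h2'⟩
  · omega
  · omega
  · omega
  · exact le_antisymm h1' h2'

theorem insertLen_pairwise (x : String) : ∀ (acc : List String), acc.Pairwise Rle →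
    (∀ a ∈ acc, a ≤ x) →
    (PySem.List.insertBy (fun a b => decide (PySem.Str.len a < PySem.Str.len b)) x acc).Pairwise Rle := by
  intro acc
  induction acc with
  | nil => intro _ _; exact List.pairwise_singleton _ _
  | cons y ys ih =>
    intro hp hle
    show (if decide (PySem.Str.len x < PySem.Str.len y) = true then x :: y :: ys
      else y :: PySem.List.insertBy _ x ys).Pairwise Rle
    have hp' := List.pairwise_cons.mp hp
    by_cases hxy : PySem.Str.len x < PySem.Str.len y
    · rw [if_pos (by simpa using hxy)]
      refine List.Pairwise.cons ?_ hp
      intro z hz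
      rcases List.mem_cons.mp hz with rfl | hz'
      · exact Or.inl hxy
      · exact Rle_trans (Or.inl hxy) (hp'.1 z hz')
    · rw [if_neg (by simpa using hxy)]
      refine List.Pairwise.cons ?_ (ih hp'.2 (fun a ha => hle a (List.mem_cons_of_mem _ ha)))
      intro z hz
      rcases (PySem.List.mem_insertBy _ _ _ _).mp hz with rfl | hz'
      · rcases lt_or_eq_of_le (not_lt.mp hxy) with h | h
        · exact Or.inl h
        · exact Or.inr ⟨h, hle y List.mem_cons_self⟩
      · exact hp'.1 z hz'

theorem sortedLen_pairwise (xs : List String) (h : xs.Pairwise (fun a b => a ≤ b)) :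
    (PySem.List.sorted xs PySem.Str.len).Pairwise Rle := by
  rw [PySem.List.sorted_eq_foldl_insertBy]
  suffices aux : ∀ (ys : List String) (acc : List String), ys.Pairwise (fun a b => a ≤ b) →
      acc.Pairwise Rle → (∀ a ∈ acc, ∀ y ∈ ys, a ≤ y) →
      (ys.foldl (fun acc x =>
        PySem.List.insertBy (fun a b => decide (PySem.Str.len a < PySem.Str.len b)) x acc) acc).Pairwise Rle by
    exact aux xs [] h List.Pairwise.nil (by simp)
  intro ys
  induction ys with
  | nil => intro acc _ hacc _; exact hacc
  | cons x t ih =>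
    intro acc hys hacc hcross
    simp only [List.foldl_cons]
    have hxt := List.pairwise_cons.mp hys
    refine ih _ hxt.2 (insertLen_pairwise x acc hacc (fun a ha => hcross a ha x List.mem_cons_self)) ?_
    intro a ha y hy
    rcases (PySem.List.mem_insertBy _ _ _ _).mp ha with rfl | ha'
    · exact hxt.1 y hy
    · exact hcross a ha' y (List.mem_cons_of_mem _ hy)

def lexlt (a b : String) : Bool :=
  decide (PySem.Str.len a < PySem.Str.len b) ||
    (!decide (PySem.Str.len b < PySem.Str.len a) && decide (a < b))

theorem sorted2_eq_foldl (xs : List String) :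
    PySem.List.sorted2 xs PySem.Str.len (fun x => x)
      = xs.foldl (fun acc x => PySem.List.insertBy lexlt x acc) [] := rfl

theorem insertLex_pairwise (x : String) : ∀ (acc : List String), acc.Pairwise Rle →
    (PySem.List.insertBy lexlt x acc).Pairwise Rle := by
  intro acc
  induction acc with
  | nil => intro _; exact List.pairwise_singleton _ _
  | cons y ys ih =>
    intro hp
    show (if lexlt x y = true then x :: y :: ys
      else y :: PySem.List.insertBy _ x ys).Pairwise Rle
    have hp' := List.pairwise_cons.mp hp
    by_cases h : lexlt x y = true
    · rw [if_pos h]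
      unfold lexlt at h
      simp only [Bool.or_eq_true, Bool.and_eq_true, Bool.not_eq_true', decide_eq_true_eq,
        decide_eq_false_iff_not] at h
      have hxy : Rle x y := by
        rcases h with h | ⟨h1, h2⟩
        · exact Or.inl h
        · by_cases hlt : PySem.Str.len x < PySem.Str.len y
          · exact Or.inl hlt
          · exact Or.inr ⟨le_antisymm (not_lt.mp h1) (not_lt.mp hlt), le_of_lt h2⟩
      refine List.Pairwise.cons ?_ hp
      intro z hz
      rcases List.mem_cons.mp hz with rfl | hz'
      · exact hxy
      · exact Rle_trans hxy (hp'.1 z hz')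
    · rw [if_neg h]
      unfold lexlt at h
      simp only [Bool.or_eq_true, Bool.and_eq_true, Bool.not_eq_true', decide_eq_true_eq,
        decide_eq_false_iff_not, not_or, not_and] at h
      have hyx : Rle y x := by
        rcases lt_or_eq_of_le (not_lt.mp h.1) with hlt | heqn
        · exact Or.inl hlt
        · rcases h with ⟨h1, h2⟩
          by_cases hlt2 : PySem.Str.len y < PySem.Str.len x
          · exact Or.inl hlt2
          · exact Or.inr ⟨heqn, not_lt.mp (h2 (fun hc => absurd heqn (by omega)))⟩
      refine List.Pairwise.cons ?_ (ih hp'.2)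
      intro z hz
      rcases (PySem.List.mem_insertBy _ _ _ _).mp hz with rfl | hz'
      · exact hyx
      · exact hp'.1 z hz'

theorem sorted2_pairwise (xs : List String) :
    (PySem.List.sorted2 xs PySem.Str.len (fun x => x)).Pairwise Rle := by
  rw [sorted2_eq_foldl]
  suffices aux : ∀ (ys acc : List String), acc.Pairwise Rle →
      (ys.foldl (fun acc x => PySem.List.insertBy lexlt x acc) acc).Pairwise Rle by
    exact aux xs [] List.Pairwise.nil
  intro ys
  induction ys with
  | nil => exact fun acc h => h
  | cons x t ih =>
    intro acc hacc
    simp only [List.foldl_cons]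
    exact ih _ (insertLex_pairwise x acc hacc)

theorem labels_eq (attrs : List String) :
    PySem.List.sorted (PySem.List.sorted
      ((PySem.List.pyRange 0 (PySem.List.len attrs) 1).foldl
        (fun temp i => if i = 0 then temp ++ attrs
          else temp ++ (PySem.List.combinations attrs (i + 1).toNat).map fjoin) [])
      (fun x => x)) PySem.Str.len
    = PySem.List.sorted2
      (((attrs.foldl (fun acc a => acc ++ acc.map (fun s => s ++ [a])) [[]]).filter
        (fun s => s ≠ [])).map fjoin)
      PySem.Str.len (fun x => x) := by
  refine List.Perm.eq_of_pairwise (fun a b _ _ h1 h2 => Rle_antisymm a b h1 h2)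
    (sortedLen_pairwise _ (PySem.List.sorted_pairwise _ _)) (sorted2_pairwise _) ?_
  exact ((PySem.List.sorted_perm _ _ _).trans
    ((PySem.List.sorted_perm _ _ _).trans (temp_perm attrs))).trans
    (PySem.List.sorted2_perm _ _ _ _).symm

-- ---- assembling the concatenation ----
theorem foldl_append_join (h : String → String) :
    ∀ (l : List String) (init : String),
      l.foldl (fun acc x => acc ++ h x) init = init ++ PySem.Str.join "" (l.map h) := by
  intro l
  induction l with
  | nil =>
    intro init
    rw [← String.toList_inj]
    simp [String.toList_append, PySem.Str.toList_join, PySem.Chars.join_nil]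
  | cons x t ih =>
    intro init
    simp only [List.foldl_cons, List.map_cons]
    rw [ih]
    rw [← String.toList_inj]
    cases t with
    | nil =>
      simp [String.toList_append, PySem.Str.toList_join, PySem.Chars.join_singleton,
        PySem.Chars.join_nil]
    | cons y t' =>
      simp only [List.map_cons, String.toList_append, PySem.Str.toList_join]
      rw [PySem.Chars.join_cons_cons]
      simp [List.append_assoc, show ("" : String).toList = [] from rfl]

-- ===== VERDICT =====
theorem generate_closure_string_spec : Claim_equal_generate_closure_string := by
  intro attrs rels _
  unfold Spec_generate_closure_string generate_closure_string generate_closure_string_alt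
  dsimp only
  rw [show (fun c : List String => PySem.Str.join "," (PySem.List.sorted c (fun x => x)))
      = fjoin from rfl]
  rw [foldl_append_join
    (fun combination => PySem.Str.join ""
      (closerA (rels.length + 1) ((PySem.Str.split? combination ",").getD []) rels)) _ ""]
  rw [show ∀ s : String, "" ++ s = s from fun s => by
    rw [← String.toList_inj]; simp]
  rw [labels_eq attrs]
  have hfun : (fun lab => PySem.Str.join ""
        (closerA (rels.length + 1) ((PySem.Str.split? lab ",").getD []) rels))
      = (fun lab => PySem.Str.join ""
        (PySem.List.sorted (bLoop rels rels.length
          (PySem.Set.ofList ((PySem.Str.split? lab ",").getD []))) (fun x => x))) :=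
    funext fun lab => by rw [perLabel]
  rw [hfun]
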